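-- pv_equiv track=rewrite | github.com/kdg2957/erica_computer | 1학년 1학기/프로그래밍기초/프기초 기말/예외처리 연습문제/에외처리 연습문제 답.py | vowel_numbering
-- ===== SOURCE A (Python) =====
-- def vowel_numbering(word):
--     number = 1
--     newword = ""
--     for c in word:
--         if c in ['a', 'e', 'i', 'o', 'u']:
--             newword += str(number)
--             number += 1
--         else:
--             newword += c
--     return newword
-- ===== SOURCE B (Python) =====
-- import re
--
-- def vowel_numbering(word):
--     parts = re.split(r'[aeiou]', word)
--     return ''.join(p + str(i) for i, p in enumerate(parts[:-1], 1)) + parts[-1]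
-- ===== Notes on version B (the rewrite author's own statement) =====
-- stated objective: idiomatic
-- what changed: B splits the word on vowels with re.split and joins the pieces back with the numbers 1..k interleaved, instead of A's character-by-character scan with a counter and string concatenation.
import Mathlib
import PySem

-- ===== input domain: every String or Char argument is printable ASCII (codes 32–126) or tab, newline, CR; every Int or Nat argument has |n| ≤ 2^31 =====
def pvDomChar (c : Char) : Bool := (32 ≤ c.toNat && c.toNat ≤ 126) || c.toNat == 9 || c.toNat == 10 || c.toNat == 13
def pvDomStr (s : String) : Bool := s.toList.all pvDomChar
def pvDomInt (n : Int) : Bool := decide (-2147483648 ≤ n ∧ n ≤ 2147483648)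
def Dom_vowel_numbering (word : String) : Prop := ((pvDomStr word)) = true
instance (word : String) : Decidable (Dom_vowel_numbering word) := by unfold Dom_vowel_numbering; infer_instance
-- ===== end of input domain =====

-- B replaces A's character-by-character counter scan by split-on-vowels + join with 1..k interleaved (idiomatic, same result).


-- ===== PORT A =====
-- the for-loop with its state (number, newword); += on strings is list append here
def vnLoop : List Char → Int → List Char → List Char
  | [], _, acc => acc
  | c :: rest, n, acc =>
    if c ∈ ['a', 'e', 'i', 'o', 'u'] then
      vnLoop rest (n + 1) (acc ++ PySem.Int.toChars n)
    else
      vnLoop rest n (acc ++ [c])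

def vowel_numbering (word : String) : String :=
  String.ofList (vnLoop word.toList 1 [])

-- ===== PORT B =====
-- re.split(r'[aeiou]', word): the pieces between vowels (k vowels give k+1 pieces)
def splitV : List Char → List (List Char)
  | [] => [[]]
  | c :: rest =>
    if c ∈ ['a', 'e', 'i', 'o', 'u'] then
      [] :: splitV rest
    else
      (c :: (splitV rest).headD []) :: (splitV rest).tail

-- ''.join(p + str(i) for i, p in enumerate(parts[:-1], 1)) + parts[-1]
def joinNum : List (List Char) → Int → List Char
  | [], _ => []
  | [p], _ => p
  | p :: ps, n => p ++ PySem.Int.toChars n ++ joinNum ps (n + 1)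

def vowel_numbering_alt (word : String) : String :=
  String.ofList (joinNum (splitV word.toList) 1)

-- ===== PRECONDITION & SPEC =====
def Spec_vowel_numbering (word : String) (out : String) : Prop := out = vowel_numbering_alt word
instance (word : String) (out : String) : Decidable (Spec_vowel_numbering word out) := by unfold Spec_vowel_numbering; infer_instance

-- ===== CLAIM (what is proved, stated in full; the proofs are below) =====
def Claim_equal_vowel_numbering : Prop := ∀ (word : String), Dom_vowel_numbering word → Spec_vowel_numbering word (vowel_numbering word)

-- ===== LEMMAS AND PROOFS =====

theorem splitV_ne_nil (l : List Char) : splitV l ≠ [] := by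
  cases l with
  | nil => simp [splitV]
  | cons c rest => simp only [splitV]; split <;> simp

theorem joinNum_cons_cons (h : List Char) (t : List (List Char)) (c : Char) (n : Int) :
    joinNum ((c :: h) :: t) n = c :: joinNum (h :: t) n := by
  cases t <;> simp [joinNum]

theorem vnLoop_eq_joinNum (l : List Char) (n : Int) (acc : List Char) :
    vnLoop l n acc = acc ++ joinNum (splitV l) n := by
  induction l generalizing n acc with
  | nil => simp [vnLoop, splitV, joinNum]
  | cons c rest ih =>
    simp only [vnLoop, splitV]
    split
    · -- vowel
      obtain ⟨h, t, hst⟩ : ∃ h t, splitV rest = h :: t := by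
        cases hs : splitV rest with
        | nil => exact absurd hs (splitV_ne_nil rest)
        | cons h t => exact ⟨h, t, rfl⟩
      rw [ih, hst]
      simp [joinNum]
    · -- consonant
      obtain ⟨h, t, hst⟩ : ∃ h t, splitV rest = h :: t := by
        cases hs : splitV rest with
        | nil => exact absurd hs (splitV_ne_nil rest)
        | cons h t => exact ⟨h, t, rfl⟩
      rw [ih, hst]
      simp [joinNum_cons_cons]

-- ===== VERDICT (by name: the statement is the Claim_ definition above) =====
theorem vowel_numbering_spec : Claim_equal_vowel_numbering := by
  intro word _
  unfold Spec_vowel_numbering vowel_numbering vowel_numbering_alt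
  rw [vnLoop_eq_joinNum]
  simp
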